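-- pv_equiv track=rewrite | github.com/chikocosta/sitemente | sistema_planejamento_completo/src/routes/planejamento.py | gerar_cronograma_aula
-- ===== SOURCE A (Python) =====
-- def gerar_cronograma_aula(duracao, atividades):
--     """Gera cronograma detalhado da aula"""
--     cronograma = []
--     tempo_por_atividade = duracao // len(atividades) if atividades else duracao
--     tempo_atual = 0
--
--     for i, atividade in enumerate(atividades):
--         if i == 0:
--             tempo_atividade = tempo_por_atividade + 5  # Mais tempo para primeira atividade
--         elif i == len(atividades) - 1:
--             tempo_atividade = duracao - tempo_atual  # Tempo restante para última atividade
--         else: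
--             tempo_atividade = tempo_por_atividade
--
--         cronograma.append({
--             "horario": f"{tempo_atual:02d}:{(tempo_atual % 60):02d} - {(tempo_atual + tempo_atividade):02d}:{((tempo_atual + tempo_atividade) % 60):02d}",
--             "atividade": atividade,
--             "duracao": f"{tempo_atividade} min"
--         })
--
--         tempo_atual += tempo_atividade
--
--     return cronograma
-- ===== SOURCE B (Python) =====
-- def _hhmm(t):
--     return f"{t:02d}:{t % 60:02d}"
--
-- def gerar_cronograma_aula(duracao, atividades):
--     """Gera cronograma detalhado da aula"""
--     n = len(atividades)
--     tpa = duracao // n if n else duracao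
--     cronograma = []
--     for i, atividade in enumerate(atividades):
--         # closed-form start time: every slot before i contributes tpa, plus the
--         # extra 5 minutes of the first slot
--         inicio = 0 if i == 0 else 5 + i * tpa
--         if i == 0:
--             dur = tpa + 5
--         elif i == n - 1:
--             dur = duracao - inicio
--         else:
--             dur = tpa
--         cronograma.append({
--             "horario": f"{_hhmm(inicio)} - {_hhmm(inicio + dur)}",
--             "atividade": atividade,
--             "duracao": f"{dur} min",
--         })
--     return cronograma
-- ===== Notes on version B (the rewrite author's own statement) =====
-- stated objective: alternative
-- what changed: Replaces A's fused accumulator loop (running tempo_atual) by computing each slot independently from its index via a closed-form start time (0 for slot 0, 5 + i*tpa otherwise), so slots are independent map items instead of a stateful scan.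
import Mathlib
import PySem

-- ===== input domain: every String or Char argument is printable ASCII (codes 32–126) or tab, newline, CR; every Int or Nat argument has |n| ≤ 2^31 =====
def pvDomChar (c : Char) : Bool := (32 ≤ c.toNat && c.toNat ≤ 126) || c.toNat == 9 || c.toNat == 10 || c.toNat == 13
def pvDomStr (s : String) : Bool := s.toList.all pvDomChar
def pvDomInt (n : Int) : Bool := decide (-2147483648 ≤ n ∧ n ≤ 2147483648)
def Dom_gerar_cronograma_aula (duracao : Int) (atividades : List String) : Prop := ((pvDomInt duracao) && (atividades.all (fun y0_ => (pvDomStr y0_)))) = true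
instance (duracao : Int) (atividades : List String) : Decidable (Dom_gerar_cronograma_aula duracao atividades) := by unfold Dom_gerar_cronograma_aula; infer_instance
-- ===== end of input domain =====

-- B replaces A's running-time accumulator by a closed-form start time (0 for slot 0, 5 + i*tpa otherwise); objective: alternative decomposition, same cost.


-- shared formatting helpers (the identical f-strings of both Pythons)
-- Python f"{t:02d}": zero-pad to width 2 (only single nonnegative digits need padding)
def pvFmt2 (t : Int) : String := if 0 ≤ t ∧ t < 10 then "0" ++ PySem.Int.toStr t else PySem.Int.toStr t

def pvEntry (inicio dur : Int) (atividade : String) : List (String × String) :=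
  [("horario", pvFmt2 inicio ++ ":" ++ pvFmt2 (PySem.Int.mod inicio 60) ++ " - " ++
               pvFmt2 (inicio + dur) ++ ":" ++ pvFmt2 (PySem.Int.mod (inicio + dur) 60)),
   ("atividade", atividade),
   ("duracao", PySem.Int.toStr dur ++ " min")]

-- ===== PORT A =====
-- A's fused loop: index i and running tempo_atual carried through the list
def pvALoop (duracao tpa n : Int) : Int → Int → List String → List (List (String × String))
  | _, _, [] => []
  | i, tempo, a :: rest =>
    let d := if i = 0 then tpa + 5 else if i = n - 1 then duracao - tempo else tpa
    pvEntry tempo d a :: pvALoop duracao tpa n (i + 1) (tempo + d) rest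

def gerar_cronograma_aula (duracao : Int) (atividades : List String) : List (List (String × String)) :=
  let tpa := if atividades.isEmpty then duracao else PySem.Int.floordiv duracao atividades.length
  pvALoop duracao tpa atividades.length 0 0 atividades

-- ===== PORT B =====
-- B: each slot computed independently from its index via the closed-form start
def pvBItem (duracao tpa n : Int) (p : Int × String) : List (String × String) :=
  let inicio := if p.1 = 0 then 0 else 5 + p.1 * tpa
  let d := if p.1 = 0 then tpa + 5 else if p.1 = n - 1 then duracao - inicio else tpa
  pvEntry inicio d p.2

def gerar_cronograma_aula_alt (duracao : Int) (atividades : List String) : List (List (String × String)) :=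
  let n : Int := atividades.length
  let tpa := if atividades.isEmpty then duracao else PySem.Int.floordiv duracao n
  (PySem.List.enumerate atividades).map (pvBItem duracao tpa n)

-- ===== PRECONDITION & SPEC =====
def Spec_gerar_cronograma_aula (duracao : Int) (atividades : List String) (out : List (List (String × String))) : Prop := out = gerar_cronograma_aula_alt duracao atividades
instance (duracao : Int) (atividades : List String) (out : List (List (String × String))) : Decidable (Spec_gerar_cronograma_aula duracao atividades out) := by unfold Spec_gerar_cronograma_aula; infer_instance

-- ===== CLAIM (what is proved, stated in full; the proofs are below) =====
def Claim_equal_gerar_cronograma_aula : Prop := ∀ (duracao : Int) (atividades : List String), Dom_gerar_cronograma_aula duracao atividades → Spec_gerar_cronograma_aula duracao atividades (gerar_cronograma_aula duracao atividades)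

-- ===== LEMMAS AND PROOFS =====

lemma pvLoop_eq_map (duracao tpa n : Int) :
    ∀ (rest : List String) (i tempo : Int), 0 ≤ i → i + rest.length = n →
      tempo = (if i = 0 then 0 else 5 + i * tpa) →
      pvALoop duracao tpa n i tempo rest
        = (PySem.List.enumerate rest i).map (pvBItem duracao tpa n) := by
  intro rest
  induction rest with
  | nil => intro i tempo _ _ _; simp [pvALoop, PySem.List.enumerate_nil]
  | cons a rest' ih =>
    intro i tempo hi hn ht
    rw [PySem.List.enumerate_cons]
    simp only [List.map_cons, pvALoop]
    refine congrArg₂ _ ?_ ?_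
    · simp [pvBItem, ← ht]
    · cases rest' with
      | nil => simp [pvALoop, PySem.List.enumerate_nil]
      | cons b rest'' =>
        have hne : i ≠ n - 1 := by
          simp only [List.length_cons] at hn; push_cast at hn; omega
        have hne1 : i + 1 ≠ 0 := by omega
        rw [ih (i + 1) _ (by omega) (by simp at hn ⊢; omega) ?_]
        by_cases h0 : i = 0 <;> simp [h0, hne, hne1, ht] <;> ring

-- ===== VERDICT (by name: the statement is the Claim_ definition above) =====
theorem gerar_cronograma_aula_spec : Claim_equal_gerar_cronograma_aula := by
  intro duracao atividades _
  simp only [Spec_gerar_cronograma_aula, gerar_cronograma_aula, gerar_cronograma_aula_alt]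
  exact (pvLoop_eq_map duracao
    (if atividades.isEmpty then duracao else PySem.Int.floordiv duracao atividades.length)
    atividades.length atividades 0 0 le_rfl (by omega) (by norm_num))
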